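-- pv_equiv track=rewrite | github.com/nyankiti/algorithm_job | atCoder/ABC_081_B_ShiftOnly.py | main2021_02_03_recursion
-- ===== SOURCE A (Python) =====
-- def main2021_02_03_recursion(N, numbers):
--   def _main(N, numbers):
--     for i in range(N):
--       if numbers[i]%2 == 1:
--         return numbers
--     numbers = list(map(lambda x: x//2, numbers))
--     sub_result = _main(N, numbers)
--     return sub_result
--   result = _main(N, numbers)
--   return result
-- ===== SOURCE B (Python) =====
-- def main2021_02_03_recursion(N, numbers):
--   def tz(x):
--     k = 0
--     while x % 2 == 0:
--       x //= 2
--       k += 1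
--     return k
--   k = min((tz(x) for x in numbers[:N] if x != 0), default=0)
--   return [x // (2 ** k) for x in numbers]
-- ===== Notes on version B (the rewrite author's own statement) =====
-- stated objective: alternative
-- what changed: A repeatedly rescans the first N elements and halves the whole list once per round until an odd appears; B computes k = the minimum trailing-zero count over the nonzero elements of numbers[:N] in a single pass and returns the list with every element floor-divided by 2**k.
import Mathlib
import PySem

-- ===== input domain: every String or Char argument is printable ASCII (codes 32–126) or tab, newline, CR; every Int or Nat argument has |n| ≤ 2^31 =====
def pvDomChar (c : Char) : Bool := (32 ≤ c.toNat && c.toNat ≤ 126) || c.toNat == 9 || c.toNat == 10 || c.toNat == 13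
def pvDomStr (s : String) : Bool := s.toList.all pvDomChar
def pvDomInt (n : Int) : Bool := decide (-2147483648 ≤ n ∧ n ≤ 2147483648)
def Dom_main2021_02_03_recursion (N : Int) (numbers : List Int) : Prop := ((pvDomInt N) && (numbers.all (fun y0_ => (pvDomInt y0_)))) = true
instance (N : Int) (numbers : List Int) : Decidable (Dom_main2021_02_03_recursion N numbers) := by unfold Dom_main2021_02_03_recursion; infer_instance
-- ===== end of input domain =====

-- B replaces A's repeated rescan-and-halve rounds by one pass computing the minimal
-- trailing-zero count k of the nonzero elements of numbers[:N], then one shift of all elements.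

-- ===== PORT A =====
-- 'for i in range(N): if numbers[i]%2 == 1: return numbers' — early-exit scan, ported as the
-- counted loop i = 0, 1, … while i < N (range is lazy in Python);
-- a failing index (Python IndexError) yields false here, which Pre_ excludes.
def pvOddScan (numbers : List Int) (i N : Int) : Bool :=
  if i < N then
    match PySem.List.pyGet? numbers i with
    | none => false
    | some x => if PySem.Int.mod x 2 == 1 then true else pvOddScan numbers (i + 1) N
  else false
termination_by (N - i).toNat
decreasing_by simp_wf; omega

-- the recursive _main; fuel only totalizes the recursion (inside Dom ∧ Pre_ the depth is < 64)
def pvMainAux : Nat → Int → List Int → List Int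
  | 0, _, numbers => numbers
  | f+1, N, numbers =>
    if pvOddScan numbers 0 N then numbers
    else pvMainAux f N (numbers.map (fun x => PySem.Int.floordiv x 2))

def main2021_02_03_recursion (N : Int) (numbers : List Int) : List Int :=
  pvMainAux 64 N numbers

-- ===== PORT B =====
-- 'while x % 2 == 0: x //= 2; k += 1' — fuel totalizes the loop (inside Dom 64 always suffices)
def pvTZ : Nat → Int → Nat
  | 0, _ => 0
  | f+1, x => if PySem.Int.mod x 2 == 0 then pvTZ f (PySem.Int.floordiv x 2) + 1 else 0

-- 'k = min((tz(x) for x in numbers[:N] if x != 0), default=0)'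
def pvAltK (N : Int) (numbers : List Int) : Nat :=
  PySem.List.minD
    (((PySem.List.slice numbers none (some N)).filter (fun x => x != 0)).map (pvTZ 64))
    (fun y => y) 0

-- '[x // (2 ** k) for x in numbers]'
def main2021_02_03_recursion_alt (N : Int) (numbers : List Int) : List Int :=
  numbers.map (fun x => PySem.Int.floordiv x ((2:Int) ^ pvAltK N numbers))

-- ===== PRECONDITION & SPEC =====
-- Exactly the inputs on which A returns: for N ≤ len(numbers) the recursion terminates iff some
-- element of numbers[:N] is nonzero (otherwise it recurses forever); for N > len(numbers) the
-- first scan either finds an odd element (and returns) or hits IndexError.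
def Pre_main2021_02_03_recursion (N : Int) (numbers : List Int) : Prop :=
  (N ≤ (numbers.length : Int) ∧ ∃ x ∈ numbers.take N.toNat, x ≠ 0)
  ∨ ((numbers.length : Int) < N ∧ ∃ x ∈ numbers, PySem.Int.mod x 2 = 1)

instance (N : Int) (numbers : List Int) : Decidable (Pre_main2021_02_03_recursion N numbers) := by
  unfold Pre_main2021_02_03_recursion; infer_instance

def pvWitness_main2021_02_03_recursion : Int × List Int := (2, [2, 4])

def Spec_main2021_02_03_recursion (N : Int) (numbers : List Int) (out : List Int) : Prop := out = main2021_02_03_recursion_alt N numbers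
instance (N : Int) (numbers : List Int) (out : List Int) : Decidable (Spec_main2021_02_03_recursion N numbers out) := by unfold Spec_main2021_02_03_recursion; infer_instance

-- ===== CLAIM (what is proved, stated in full; the proofs are below) =====
def Claim_equal_main2021_02_03_recursion : Prop := ∀ (N : Int) (numbers : List Int), Dom_main2021_02_03_recursion N numbers → Pre_main2021_02_03_recursion N numbers → Spec_main2021_02_03_recursion N numbers (main2021_02_03_recursion N numbers)

-- ===== LEMMAS AND PROOFS =====

def pvOdd (x : Int) : Bool := PySem.Int.mod x 2 == 1

def pvTzList (N : Int) (numbers : List Int) : List Nat :=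
  ((numbers.take N.toNat).filter (fun x => x != 0)).map (pvTZ 64)

def pvK (N : Int) (numbers : List Int) : Nat :=
  PySem.List.minD (pvTzList N numbers) (fun y => y) 0

theorem pvMod2 (x : Int) : PySem.Int.mod x 2 = x % 2 :=
  PySem.Int.mod_eq_emod_of_pos (by norm_num)

theorem pvFd2 (x : Int) : PySem.Int.floordiv x 2 = x / 2 :=
  PySem.Int.floordiv_eq_ediv_of_pos (by norm_num)

theorem pvOddScan_shift : ∀ (m : Nat) (y : Int) (ys : List Int) (i N : Int),
    0 ≤ i → (N - i).toNat = m →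
    pvOddScan (y :: ys) (i + 1) (N + 1) = pvOddScan ys i N := by
  intro m
  induction m with
  | zero =>
    intro y ys i N hi hm
    conv_lhs => rw [pvOddScan]
    conv_rhs => rw [pvOddScan]
    rw [if_neg (by omega), if_neg (by omega)]
  | succ m ih =>
    intro y ys i N hi hm
    have hiN : i < N := by omega
    have hcast : i = ((i.toNat : Nat) : Int) := by omega
    conv_lhs => rw [pvOddScan]
    conv_rhs => rw [pvOddScan]
    rw [if_pos (by omega : i + 1 < N + 1), if_pos hiN, hcast,
      PySem.List.pyGet?_cons_succ]
    cases PySem.List.pyGet? ys ((i.toNat : Nat) : Int) with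
    | none => rfl
    | some x =>
      by_cases hx : PySem.Int.mod x 2 == 1
      · simp only [hx, if_true]
      · simp only [hx, if_false]
        rw [← hcast, ih y ys (i + 1) N (by omega) (by omega)]

theorem pvScan_eq_any (n : Nat) : ∀ numbers : List Int,
    pvOddScan numbers 0 (n : Int) = (numbers.take n).any pvOdd := by
  induction n with
  | zero =>
    intro numbers
    rw [pvOddScan, if_neg (by omega)]
    simp
  | succ n ih =>
    intro numbers
    cases numbers with
    | nil =>
      rw [pvOddScan, if_pos (by positivity)]
      simp [PySem.List.pyGet?_zero]
    | cons y ys =>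
      rw [pvOddScan, if_pos (by positivity), PySem.List.pyGet?_zero_cons]
      have hshift : pvOddScan (y :: ys) (0 + 1) ((n : Int) + 1) = pvOddScan ys 0 (n : Int) :=
        pvOddScan_shift ((n : Int) - 0).toNat y ys 0 (n : Int) le_rfl rfl
      have hcast : ((n.succ : Nat) : Int) = (n : Int) + 1 := by push_cast; ring
      rw [hcast, hshift, ih ys]
      simp [List.take_succ_cons, pvOdd, pvMod2, Bool.beq_eq_decide_eq]

theorem pvTZ_main : ∀ (f : Nat) (x : Int), x ≠ 0 → x.natAbs < 2 ^ f →
    pvTZ f x < f ∧ pvTZ (f + 1) x = pvTZ f x := by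
  intro f
  induction f with
  | zero => intro x hx hb; omega
  | succ f ih =>
    intro x hx hb
    by_cases he : x % 2 = 0
    · have hy0 : x / 2 ≠ 0 := by omega
      have hyb : (x / 2).natAbs < 2 ^ f := by
        have : (x / 2).natAbs * 2 = x.natAbs := by omega
        have h2 : (2:Nat) ^ (f + 1) = 2 ^ f * 2 := by ring
        omega
      have hrec := ih (x / 2) hy0 hyb
      have e1 : pvTZ (f + 1) x = pvTZ f (x / 2) + 1 := by
        simp [pvTZ, pvMod2, pvFd2, he]
      have e2 : pvTZ (f + 1 + 1) x = pvTZ (f + 1) (x / 2) + 1 := by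
        simp [pvTZ, pvMod2, pvFd2, he]
      refine ⟨by omega, by omega⟩
    · have e1 : pvTZ (f + 1) x = 0 := by simp [pvTZ, pvMod2, he]
      have e2 : pvTZ (f + 1 + 1) x = 0 := by simp [pvTZ, pvMod2, he]
      omega
  
theorem pvTZ_stable (f g : Nat) (x : Int) (hfg : f ≤ g) (hx : x ≠ 0)
    (hb : x.natAbs < 2 ^ f) : pvTZ g x = pvTZ f x := by
  induction g, hfg using Nat.le_induction with
  | base => rfl
  | succ g hfg ih =>
    have hbg : x.natAbs < 2 ^ g :=
      lt_of_lt_of_le hb (Nat.pow_le_pow_right (by norm_num) hfg)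
    rw [(pvTZ_main g x hx hbg).2, ih]

theorem pvTZ_halve (x : Int) (hx : x ≠ 0) (he : x % 2 = 0)
    (hb : x.natAbs ≤ 2 ^ 31) :
    pvTZ 64 (x / 2) = pvTZ 64 x - 1 ∧ 1 ≤ pvTZ 64 x := by
  have hb64 : x.natAbs < 2 ^ 64 := by
    have : (2:Nat) ^ 31 < 2 ^ 64 := by norm_num
    omega
  have e1 : pvTZ (64 + 1) x = pvTZ 64 (x / 2) + 1 := by
    simp [pvTZ, pvMod2, pvFd2, he]
  have e2 : pvTZ (64 + 1) x = pvTZ 64 x := (pvTZ_main 64 x hx hb64).2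
  omega

theorem pvFoldlMin_mem (t : List Nat) : ∀ x : Nat, t.foldl min x ∈ x :: t := by
  induction t with
  | nil => intro x; simp
  | cons a t ih =>
    intro x
    have h := ih (min x a)
    simp only [List.foldl_cons]
    rcases List.mem_cons.mp h with h | h
    · rcases min_choice x a with hm | hm <;> rw [hm] at h ⊢ <;> simp [h]
    · exact List.mem_cons_of_mem _ (List.mem_cons_of_mem _ h)

theorem pvFoldlMin_le (t : List Nat) : ∀ x : Nat, ∀ y ∈ x :: t, t.foldl min x ≤ y := by
  induction t with
  | nil => intro x y hy; simp at hy; simp [hy]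
  | cons a t ih =>
    intro x y hy
    have h1 := ih (min x a)
    rcases List.mem_cons.mp hy with rfl | hy
    · have := h1 (min y a) (by simp)
      simp only [List.foldl_cons]
      omega
    rcases List.mem_cons.mp hy with rfl | hy
    · have := h1 (min x y) (by simp)
      simp only [List.foldl_cons]
      omega
    · exact ih (min x a) y (by simp [hy])

theorem pvFoldlMin_sub_one (t : List Nat) : ∀ x : Nat,
    (t.map (· - 1)).foldl min (x - 1) = t.foldl min x - 1 := by
  induction t with
  | nil => intro x; rfl
  | cons a t ih =>
    intro x
    simp only [List.map_cons, List.foldl_cons]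
    rw [Nat.sub_min_sub_right, ih]

theorem pvK_le_mem (N : Int) (numbers : List Int) (a : Nat)
    (ha : a ∈ pvTzList N numbers) : pvK N numbers ≤ a := by
  unfold pvK
  cases h : pvTzList N numbers with
  | nil => simp [h] at ha
  | cons x t =>
    rw [h] at ha
    rw [PySem.List.minD, PySem.List.min?_id_cons]
    exact pvFoldlMin_le t x a ha

theorem pvK_mem (N : Int) (numbers : List Int) (h : pvTzList N numbers ≠ []) :
    pvK N numbers ∈ pvTzList N numbers := by
  unfold pvK
  cases hl : pvTzList N numbers with
  | nil => exact absurd hl h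
  | cons x t =>
    rw [PySem.List.minD, PySem.List.min?_id_cons]
    exact pvFoldlMin_mem t x

-- the main loop invariant: with k = pvK and enough fuel, A's recursion shifts every element by k
theorem pvMain_loop : ∀ (f k : Nat) (N : Int) (numbers : List Int),
    (∀ x ∈ numbers, x.natAbs ≤ 2 ^ 31) →
    Pre_main2021_02_03_recursion N numbers →
    pvK N numbers = k → k < f →
    pvMainAux f N numbers = numbers.map (fun x => PySem.Int.floordiv x ((2:Int) ^ k)) := by
  intro f
  induction f with
  | zero => intro k N numbers _ _ _ hk; omega
  | succ f ih =>
    intro k N numbers hbnd hpre hk hkf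
    have hN0 : 0 < N := by
      rcases hpre with ⟨_, x, hx, _⟩ | ⟨hlen, _⟩
      · by_contra h
        have : N.toNat = 0 := by omega
        simp [this] at hx
      · have : (0:Int) ≤ numbers.length := by positivity
        omega
    have hNn : N = ((N.toNat : Nat) : Int) := by omega
    rw [pvMainAux, hNn, pvScan_eq_any N.toNat numbers]
    by_cases hany : (numbers.take N.toNat).any pvOdd
    · -- an odd element in the prefix: A returns at once, and k = 0
      rw [if_pos hany]
      obtain ⟨x, hxmem, hxodd⟩ := List.any_eq_true.mp hany
      have hxm : x % 2 = 1 := by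
        have := of_decide_eq_true (by simpa [pvOdd, pvMod2] using hxodd)
        simpa [pvMod2] using this
      have hxne : x ≠ 0 := by omega
      have htz0 : pvTZ 64 x = 0 := by
        show pvTZ (63 + 1) x = 0
        simp [pvTZ, pvMod2, hxm]
      have h0mem : (0:Nat) ∈ pvTzList N numbers := by
        unfold pvTzList
        rw [← htz0]
        exact List.mem_map_of_mem (List.mem_filter.mpr ⟨hxmem, by simp [hxne]⟩)
      have hk0 : k = 0 := by have := pvK_le_mem N numbers 0 h0mem; omega
      subst hk0
      have : ∀ y ∈ numbers, PySem.Int.floordiv y ((2:Int) ^ 0) = y := by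
        intro y _
        rw [pow_zero, PySem.Int.floordiv_eq_ediv_of_pos (by norm_num), Int.ediv_one]
      rw [List.map_congr_left this, List.map_id']
    · -- whole prefix even: one halving round, recurse with k - 1
      rw [if_neg hany]
      have hall : ∀ x ∈ numbers.take N.toNat, x % 2 = 0 := by
        intro x hx
        have hne1 := List.any_eq_false.mp (Bool.eq_false_iff.mpr hany) x hx
        have : ¬ x % 2 = 1 := fun h1 => hne1 (by simp [pvOdd, pvMod2, h1])
        omega
      -- the second Pre_ disjunct is impossible here
      have hcase : N ≤ (numbers.length : Int) ∧ ∃ x ∈ numbers.take N.toNat, x ≠ 0 := by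
        rcases hpre with h | ⟨hlen, x, hx, hxm⟩
        · exact h
        · exfalso
          have htake : numbers.take N.toNat = numbers := List.take_of_length_le (by omega)
          have := hall x (by rw [htake]; exact hx)
          rw [pvMod2] at hxm; omega
      obtain ⟨hNle, x0, hx0mem, hx0ne⟩ := hcase
      have hx0even : x0 % 2 = 0 := hall x0 hx0mem
      have hx0bnd : x0.natAbs ≤ 2 ^ 31 := hbnd x0 (List.mem_of_mem_take hx0mem)
      -- every entry of pvTzList is ≥ 1, and the list is nonempty, so k ≥ 1
      have htzlist_ge : ∀ a ∈ pvTzList N numbers, 1 ≤ a := by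
        intro a ha
        obtain ⟨x, hxf, rfl⟩ := List.mem_map.mp ha
        obtain ⟨hxt, hxne'⟩ := List.mem_filter.mp hxf
        have hxne : x ≠ 0 := by simpa using hxne'
        exact (pvTZ_halve x hxne (hall x hxt) (hbnd x (List.mem_of_mem_take hxt))).2
      have hne : pvTzList N numbers ≠ [] := by
        intro hnil
        have : pvTZ 64 x0 ∈ pvTzList N numbers :=
          List.mem_map_of_mem (List.mem_filter.mpr ⟨hx0mem, by simp [hx0ne]⟩)
        simp [hnil] at this
      have hk1 : 1 ≤ k := by
        have := htzlist_ge _ (pvK_mem N numbers hne)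
        omega
      set halved := numbers.map (fun x => PySem.Int.floordiv x 2) with hhalved
      -- bound, Pre_ and pvK for the halved list
      have hbnd' : ∀ y ∈ halved, y.natAbs ≤ 2 ^ 31 := by
        intro y hy
        obtain ⟨x, hx, rfl⟩ := List.mem_map.mp hy
        rw [pvFd2]
        have := hbnd x hx
        omega
      have htake' : halved.take N.toNat = (numbers.take N.toNat).map
          (fun x => PySem.Int.floordiv x 2) := by
        rw [hhalved, List.map_take]
      have hpre' : Pre_main2021_02_03_recursion N halved := by
        left
        refine ⟨by rw [hhalved]; simpa using hNle, PySem.Int.floordiv x0 2, ?_, ?_⟩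
        · rw [htake']; exact List.mem_map_of_mem hx0mem
        · rw [pvFd2]; omega
      have htz' : pvTzList N halved = (pvTzList N numbers).map (· - 1) := by
        unfold pvTzList
        rw [htake', List.filter_map]
        have hfe : (numbers.take N.toNat).filter
            ((fun x => x != 0) ∘ (fun x => PySem.Int.floordiv x 2)) =
            (numbers.take N.toNat).filter (fun x => x != 0) := by
          apply List.filter_congr
          intro x hx
          have he := hall x hx
          rw [Function.comp_apply, pvFd2]
          by_cases hx0 : x = 0
          · subst hx0; decide
          · have hhalf : x / 2 ≠ 0 := by omega
            rw [Bool.eq_iff_iff]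
            simp [hx0, hhalf]
        rw [hfe, List.map_map, List.map_map]
        apply List.map_congr_left
        intro x hxf
        obtain ⟨hxt, hxne'⟩ := List.mem_filter.mp hxf
        have hxne : x ≠ 0 := by simpa using hxne'
        rw [Function.comp_apply, Function.comp_apply, pvFd2]
        exact (pvTZ_halve x hxne (hall x hxt) (hbnd x (List.mem_of_mem_take hxt))).1
      have hK' : pvK N halved = k - 1 := by
        unfold pvK
        rw [htz']
        cases hl : pvTzList N numbers with
        | nil => exact absurd hl hne
        | cons a t =>
          rw [List.map_cons, PySem.List.minD, PySem.List.min?_id_cons]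
          simp only [Option.getD_some]
          rw [pvFoldlMin_sub_one]
          have : pvK N numbers = t.foldl min a := by
            unfold pvK
            rw [hl, PySem.List.minD, PySem.List.min?_id_cons]
            rfl
          omega
      rw [← hNn, ih (k - 1) N halved hbnd' hpre' hK' (by omega)]
      rw [hhalved, List.map_map]
      apply List.map_congr_left
      intro x _
      rw [Function.comp_apply, pvFd2,
        PySem.Int.floordiv_eq_ediv_of_pos (b := (2:Int) ^ (k - 1)) (by positivity),
        PySem.Int.floordiv_eq_ediv_of_pos (b := (2:Int) ^ k) (by positivity),
        Int.ediv_ediv_eq_ediv_mul (by norm_num)]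
      congr 1
      rw [← pow_succ']
      congr 1
      omega

-- ===== VERDICT (by name: the statement is the Claim_ definition above) =====
theorem main2021_02_03_recursion_spec : Claim_equal_main2021_02_03_recursion := by
  intro N numbers hdom hpre
  unfold Spec_main2021_02_03_recursion
  have hbnd : ∀ x ∈ numbers, x.natAbs ≤ 2 ^ 31 := by
    intro x hx
    unfold Dom_main2021_02_03_recursion at hdom
    simp only [Bool.and_eq_true, List.all_eq_true] at hdom
    have := of_decide_eq_true (hdom.2 x hx)
    have h31 : (2:Nat) ^ 31 = 2147483648 := by norm_num
    omega
  have hN0 : 0 < N := by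
    rcases hpre with ⟨_, x, hx, _⟩ | ⟨hlen, _⟩
    · by_contra h
      have : N.toNat = 0 := by omega
      simp [this] at hx
    · have : (0:Int) ≤ numbers.length := by positivity
      omega
  -- a nonzero element of the prefix, in either Pre_ case
  obtain ⟨x0, hx0mem, hx0ne⟩ : ∃ x ∈ numbers.take N.toNat, x ≠ 0 := by
    rcases hpre with ⟨_, h⟩ | ⟨hlen, x, hx, hxm⟩
    · exact h
    · refine ⟨x, ?_, ?_⟩
      · rw [List.take_of_length_le (by omega)]; exact hx
      · rw [pvMod2] at hxm; omega
  have hx0bnd : x0.natAbs ≤ 2 ^ 31 := hbnd x0 (List.mem_of_mem_take hx0mem)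
  have hK64 : pvK N numbers < 64 := by
    have hmem : pvTZ 64 x0 ∈ pvTzList N numbers :=
      List.mem_map_of_mem (List.mem_filter.mpr ⟨hx0mem, by simp [hx0ne]⟩)
    have hb32 : x0.natAbs < 2 ^ 32 := by
      have : (2:Nat) ^ 31 < 2 ^ 32 := by norm_num
      omega
    have hstab : pvTZ 64 x0 = pvTZ 32 x0 := pvTZ_stable 32 64 x0 (by omega) hx0ne hb32
    have hlt := (pvTZ_main 32 x0 hx0ne hb32).1
    have := pvK_le_mem N numbers _ hmem
    omega
  have hk : pvAltK N numbers = pvK N numbers := by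
    unfold pvAltK pvK pvTzList
    rw [PySem.List.slice_to numbers (show (0:Int) ≤ N by omega)]
  unfold main2021_02_03_recursion_alt
  rw [hk]
  exact pvMain_loop 64 (pvK N numbers) N numbers hbnd hpre rfl hK64
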